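-- pv_equiv track=rewrite | github.com/tariniteam/QueryMetaDataParser | query_parser.py | get_token_index
-- ===== SOURCE A (Python) =====
-- def get_token_index(token_list,start,stop):
--     """
--         This method is used to get the index of Start and Stop literal index nunmber to calling method
--         return: start_index, stop_index
--     """
--     start_index = 0
--     stop_index = 0
--
--     for index in range(len(token_list)):
--         current_value = token_list[index]
--         if (str(current_value[0]) == 'Token.Keyword' and str(current_value[1]) == start):
--             start_index = index
--         if (str(current_value[0]) == 'Token.Keyword' and str(current_value[1]) == stop):
--             stop_index = index
--
--     return start_index, stop_index
-- ===== SOURCE B (Python) =====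
-- def get_token_index(token_list, start, stop):
--     def last_keyword_index(value):
--         # backward scan with early exit; 0 if never found
--         for index in range(len(token_list) - 1, -1, -1):
--             current_value = token_list[index]
--             if str(current_value[0]) == 'Token.Keyword' and str(current_value[1]) == value:
--                 return index
--         return 0
--     return last_keyword_index(start), last_keyword_index(stop)
-- ===== Notes on version B (the rewrite author's own statement) =====
-- stated objective: alternative
-- what changed: Replaces A's single forward sweep that overwrites both indices with two independent backward searches that return at the first (i.e. last) matching keyword, defaulting to 0.
import Mathlib
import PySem

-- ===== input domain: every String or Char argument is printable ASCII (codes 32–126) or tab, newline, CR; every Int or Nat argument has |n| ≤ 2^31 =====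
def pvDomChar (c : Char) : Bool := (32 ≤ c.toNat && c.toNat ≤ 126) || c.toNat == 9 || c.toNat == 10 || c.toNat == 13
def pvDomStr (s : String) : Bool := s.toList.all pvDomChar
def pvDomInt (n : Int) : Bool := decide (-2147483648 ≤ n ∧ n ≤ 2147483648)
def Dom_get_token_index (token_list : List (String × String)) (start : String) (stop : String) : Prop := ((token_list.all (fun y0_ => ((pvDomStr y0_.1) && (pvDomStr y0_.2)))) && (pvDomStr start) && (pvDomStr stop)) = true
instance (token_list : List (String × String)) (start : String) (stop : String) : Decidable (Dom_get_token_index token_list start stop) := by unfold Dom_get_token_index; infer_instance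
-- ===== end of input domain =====

-- B replaces A's forward overwrite sweep with two independent backward early-exit searches (objective: alternative).


-- ===== PORT A =====
-- forward sweep over all indices; each keyword match overwrites the stored index
def get_token_index (token_list : List (String × String)) (start : String) (stop : String) : Int × Int :=
  (List.range token_list.length).foldl
    (fun st index =>
      let current_value := token_list.getD index ("", "")
      let start_index : Int :=
        if current_value.1 == "Token.Keyword" && current_value.2 == start then (index : Int) else st.1
      let stop_index : Int :=
        if current_value.1 == "Token.Keyword" && current_value.2 == stop then (index : Int) else st.2
      (start_index, stop_index))
    (0, 0)

-- ===== PORT B =====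
-- backward scan from index i-1 down to 0, returning at the first match; 0 if none
def lastKeywordIndex (token_list : List (String × String)) (value : String) : Nat → Int
  | 0 => 0
  | i + 1 =>
    let current_value := token_list.getD i ("", "")
    if current_value.1 == "Token.Keyword" && current_value.2 == value then (i : Int)
    else lastKeywordIndex token_list value i

def get_token_index_alt (token_list : List (String × String)) (start : String) (stop : String) : Int × Int :=
  (lastKeywordIndex token_list start token_list.length,
   lastKeywordIndex token_list stop token_list.length)

-- ===== PRECONDITION & SPEC =====
def Spec_get_token_index (token_list : List (String × String)) (start : String) (stop : String) (out : Int × Int) : Prop := out = get_token_index_alt token_list start stop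
instance (token_list : List (String × String)) (start : String) (stop : String) (out : Int × Int) : Decidable (Spec_get_token_index token_list start stop out) := by unfold Spec_get_token_index; infer_instance

-- ===== CLAIM (what is proved, stated in full; the proofs are below) =====
def Claim_equal_get_token_index : Prop := ∀ (token_list : List (String × String)) (start : String) (stop : String), Dom_get_token_index token_list start stop → Spec_get_token_index token_list start stop (get_token_index token_list start stop)

-- ===== LEMMAS AND PROOFS =====
theorem foldl_range_eq_lastKeyword (token_list : List (String × String)) (start stop : String) (n : Nat) :
    (List.range n).foldl
      (fun st index =>
        let current_value := token_list.getD index ("", "")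
        let start_index : Int :=
          if current_value.1 == "Token.Keyword" && current_value.2 == start then (index : Int) else st.1
        let stop_index : Int :=
          if current_value.1 == "Token.Keyword" && current_value.2 == stop then (index : Int) else st.2
        (start_index, stop_index))
      (0, 0)
    = (lastKeywordIndex token_list start n, lastKeywordIndex token_list stop n) := by
  induction n with
  | zero => simp [lastKeywordIndex]
  | succ n ih =>
    rw [List.range_succ, List.foldl_append, List.foldl_cons, List.foldl_nil, ih]
    simp [lastKeywordIndex]

-- ===== VERDICT (by name: the statement is the Claim_ definition above) =====
theorem get_token_index_spec : Claim_equal_get_token_index := by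
  intro token_list start stop _
  unfold Spec_get_token_index get_token_index get_token_index_alt
  exact foldl_range_eq_lastKeyword token_list start stop token_list.length
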